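-- pv_equiv track=rewrite | github.com/pypi-data/pypi-mirror-322 | packages/jiragen/jiragen-0.5.0.tar.gz/jiragen-0.5.0/jiragen/cli/upload.py | convert_md_to_jira
-- ===== SOURCE A (Python) =====
-- from typing import Any, Dict, Optional
--
-- def convert_md_to_jira(md_text: Optional[str]) -> str:
--     """Convert markdown text to Jira markup."""
--     if not md_text:
--         return ""
--
--     # Headers
--     md_text = md_text.replace("### ", "h3. ")
--     md_text = md_text.replace("## ", "h2. ")
--     md_text = md_text.replace("# ", "h1. ")
--
--     # Lists
--     lines = md_text.split("\n")
--     converted_lines = []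
--     for line in lines:
--         if line.strip().startswith("- "):
--             line = "* " + line.strip()[2:]
--         elif line.strip().startswith("* "):
--             line = "* " + line.strip()[2:]
--         elif line.strip().startswith("1. "):
--             line = "# " + line.strip()[3:]
--         converted_lines.append(line)
--
--     md_text = "\n".join(converted_lines)
--
--     # Task lists
--     md_text = md_text.replace("- [ ]", "(x)")
--     md_text = md_text.replace("- [x]", "(/) ")
--
--     # Code blocks
--     md_text = md_text.replace("```", "{code}")
--
--     # Bold and Italic
--     md_text = md_text.replace("**", "*")
--     md_text = md_text.replace("__", "_")
--
--     return md_text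
-- ===== SOURCE B (Python) =====
-- from typing import Optional
--
-- _HEAD = [("### ", "h3. "), ("## ", "h2. "), ("# ", "h1. ")]
-- _TAIL = [("- [ ]", "(x)"), ("- [x]", "(/) "), ("```", "{code}"),
--          ("**", "*"), ("__", "_")]
--
--
-- def _scan(patterns, s):
--     """One left-to-right pass: at each position emit the replacement of the
--     first (highest-priority) pattern that matches, else the character."""
--     out = []
--     i = 0
--     n = len(s)
--     while i < n:
--         for old, new in patterns:
--             if s.startswith(old, i):
--                 out.append(new)
--                 i += len(old)
--                 break
--         else:
--             out.append(s[i])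
--             i += 1
--     return "".join(out)
--
--
-- def convert_md_to_jira(md_text: Optional[str]) -> str:
--     """Convert markdown text to Jira markup (per-line multi-pattern scanner)."""
--     if not md_text:
--         return ""
--     res = []
--     for line in md_text.split("\n"):
--         line = _scan(_HEAD, line)
--         s = line.strip()
--         if s.startswith("- ") or s.startswith("* "):
--             line = "* " + s[2:]
--         elif s.startswith("1. "):
--             line = "# " + s[3:]
--         res.append(_scan(_TAIL, line))
--     return "\n".join(res)
-- ===== Notes on version B (the rewrite author's own statement) =====
-- stated objective: alternative
-- what changed: A makes eight sequential whole-text str.replace passes around a split/loop/join; B splits into lines once and converts each line with a hand-written single left-to-right multi-pattern scanner (priority matching of the three header patterns in one pass, then the list branch, then one pass matching the five task-list/code/bold/italic patterns), never calling str.replace.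
import Mathlib
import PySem

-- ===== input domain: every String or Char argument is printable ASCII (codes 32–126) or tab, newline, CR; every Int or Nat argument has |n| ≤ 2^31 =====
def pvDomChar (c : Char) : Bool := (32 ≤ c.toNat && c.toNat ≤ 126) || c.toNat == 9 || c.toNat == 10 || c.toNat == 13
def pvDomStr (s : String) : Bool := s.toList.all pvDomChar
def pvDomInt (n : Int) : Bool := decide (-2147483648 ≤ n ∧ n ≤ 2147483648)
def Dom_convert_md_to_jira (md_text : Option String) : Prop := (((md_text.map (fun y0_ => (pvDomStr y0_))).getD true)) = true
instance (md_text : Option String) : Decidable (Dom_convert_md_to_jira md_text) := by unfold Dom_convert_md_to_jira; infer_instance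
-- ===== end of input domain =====

-- B replaces A's eight sequential whole-text str.replace passes by a per-line single
-- left-to-right multi-pattern scanner (priority matching); equal return value proved.

-- ===== PORT A =====
-- the body of A's `for line in lines` loop (each `line.strip()` re-computed as in the Python;
-- `s[2:]`/`s[3:]` with a non-negative index is exactly List.drop)
def pvALine (line : List Char) : List Char :=
  if PySem.Chars.startswith (PySem.Chars.strip line) "- ".toList then
    "* ".toList ++ (PySem.Chars.strip line).drop 2
  else if PySem.Chars.startswith (PySem.Chars.strip line) "* ".toList then
    "* ".toList ++ (PySem.Chars.strip line).drop 2
  else if PySem.Chars.startswith (PySem.Chars.strip line) "1. ".toList then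
    "# ".toList ++ (PySem.Chars.strip line).drop 3
  else line

-- A after the emptiness guard, on the code points (PySem.Str.* are thin wrappers over these;
-- `split("\n")` with the non-empty separator is PySem.Chars.splitOn)
def pvAChars (cs : List Char) : List Char :=
  let t := PySem.Chars.replace (PySem.Chars.replace (PySem.Chars.replace cs
             "### ".toList "h3. ".toList) "## ".toList "h2. ".toList) "# ".toList "h1. ".toList
  let lines := PySem.Chars.splitOn t ['\n']
  let converted_lines := lines.foldl (fun acc l => acc ++ [pvALine l]) []
  let t2 := PySem.Chars.join ['\n'] converted_lines
  let t3 := PySem.Chars.replace (PySem.Chars.replace t2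
             "- [ ]".toList "(x)".toList) "- [x]".toList "(/) ".toList
  let t4 := PySem.Chars.replace t3 "```".toList "{code}".toList
  PySem.Chars.replace (PySem.Chars.replace t4 "**".toList "*".toList) "__".toList "_".toList

def convert_md_to_jira (md_text : Option String) : String :=
  match md_text with
  | none => ""            -- `if not md_text` (None)
  | some s =>
    if s.toList = [] then ""   -- `if not md_text` (empty string)
    else String.ofList (pvAChars s.toList)

-- ===== PORT B =====
-- Source B's `_scan` inner `for old, new in patterns: if s.startswith(old, i)` loop:
-- first pattern of the priority list matching at the current position
def pvFind (ps : List (List Char × List Char)) (l : List Char) :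
    Option (List Char × List Char) :=
  ps.find? (fun p => p.1.isPrefixOf l && !p.1.isEmpty)

-- Source B's `_scan` position loop: emit the replacement of the first matching pattern
-- and jump past the match, else emit the character and advance by one
def pvScan (ps : List (List Char × List Char)) : List Char → List Char
  | [] => []
  | c :: t =>
    match pvFind ps (c :: t) with
    | some p => p.2 ++ pvScan ps (t.drop (p.1.length - 1))
    | none => c :: pvScan ps t
termination_by l => l.length
decreasing_by
  · simp only [List.length_cons, List.length_drop]; omega
  · simp

-- Source B's `_HEAD` and `_TAIL` pattern tables
def pvHEAD : List (List Char × List Char) :=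
  [("### ".toList, "h3. ".toList), ("## ".toList, "h2. ".toList), ("# ".toList, "h1. ".toList)]
def pvTAIL : List (List Char × List Char) :=
  [("- [ ]".toList, "(x)".toList), ("- [x]".toList, "(/) ".toList),
   ("```".toList, "{code}".toList), ("**".toList, "*".toList), ("__".toList, "_".toList)]

-- body of Source B's `for line in md_text.split("\n")` loop
def pvBLine (line : List Char) : List Char :=
  let l := pvScan pvHEAD line
  let s := PySem.Chars.strip l
  let l2 :=
    if PySem.Chars.startswith s "- ".toList || PySem.Chars.startswith s "* ".toList then
      "* ".toList ++ s.drop 2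
    else if PySem.Chars.startswith s "1. ".toList then
      "# ".toList ++ s.drop 3
    else l
  pvScan pvTAIL l2

def convert_md_to_jira_alt (md_text : Option String) : String :=
  match md_text with
  | none => ""
  | some s =>
    if s.toList = [] then ""
    else String.ofList (PySem.Chars.join ['\n']
           ((PySem.Chars.splitOn s.toList ['\n']).foldl (fun acc l => acc ++ [pvBLine l]) []))

-- ===== PRECONDITION & SPEC =====
def Spec_convert_md_to_jira (md_text : Option String) (out : String) : Prop := out = convert_md_to_jira_alt md_text
instance (md_text : Option String) (out : String) : Decidable (Spec_convert_md_to_jira md_text out) := by unfold Spec_convert_md_to_jira; infer_instance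

-- ===== CLAIM (what is proved, stated in full; the proofs are below) =====
def Claim_equal_convert_md_to_jira : Prop := ∀ (md_text : Option String), Dom_convert_md_to_jira md_text → Spec_convert_md_to_jira md_text (convert_md_to_jira md_text)

-- ===== LEMMAS AND PROOFS =====

-- recursion-style reformulation of Python str.replace (left-to-right, no rescan of output)
def pvRep (old new : List Char) : List Char → List Char
  | [] => []
  | c :: t =>
    if old.isPrefixOf (c :: t) ∧ old ≠ [] then new ++ pvRep old new (t.drop (old.length - 1))
    else c :: pvRep old new t
termination_by l => l.length
decreasing_by
  · simp only [List.length_cons, List.length_drop]; omega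
  · simp

theorem pvRep_go (old new : List Char) (h : old ≠ []) :
    ∀ (fuel : Nat) (l acc : List Char), l.length ≤ fuel →
      PySem.Chars.replace.go old new fuel l acc = acc.reverse ++ pvRep old new l := by
  intro fuel
  induction fuel with
  | zero =>
    intro l acc hl
    have : l = [] := by cases l <;> simp_all
    subst this
    simp [PySem.Chars.replace.go, pvRep]
  | succ fuel ih =>
    intro l acc hl
    cases l with
    | nil => simp [PySem.Chars.replace.go, pvRep]
    | cons c t =>
      rw [PySem.Chars.replace.go]
      by_cases hp : old.isPrefixOf (c :: t)
      · rw [if_pos hp]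
        have hlen : old.length ≤ t.length + 1 := by
          have := List.IsPrefix.length_le (List.isPrefixOf_iff_prefix.mp hp)
          simpa using this
        have hpos : 1 ≤ old.length := by
          cases old with | nil => exact absurd rfl h | cons _ _ => simp
        have hdrop : (c :: t).drop old.length = t.drop (old.length - 1) := by
          cases old with
          | nil => exact absurd rfl h
          | cons o os => simp
        rw [hdrop, ih _ _ (by simp at hl ⊢; omega)]
        rw [pvRep]
        rw [if_pos ⟨hp, h⟩]
        simp
      · rw [if_neg hp, ih _ _ (by simp at hl ⊢; omega)]
        rw [pvRep, if_neg (by tauto)]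
        simp

theorem replace_eq_pvRep (l old new : List Char) (h : old ≠ []) :
    PySem.Chars.replace l old new = pvRep old new l := by
  rw [PySem.Chars.replace]
  rw [if_neg (by simp [h])]
  simpa using pvRep_go old new h l.length l [] le_rfl

-- ---- splitOn / join machinery (A's split/loop/join, distributed over pvRep) ----

def pvPre' (xs : List Char) : List (List Char) → List (List Char)
  | [] => [xs]
  | h :: t => (xs ++ h) :: t

def pvSpl : List Char → List (List Char)
  | [] => [[]]
  | c :: t => if c = '\n' then [] :: pvSpl t else pvPre' [c] (pvSpl t)

theorem pvSpl_ne_nil (l : List Char) : pvSpl l ≠ [] := by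
  cases l with
  | nil => simp [pvSpl]
  | cons c t =>
    rw [pvSpl]
    split
    · simp
    · cases h : pvSpl t <;> simp [pvPre']

theorem pvSpl_go :
    ∀ (fuel : Nat) (l cur : List Char) (acc : List (List Char)), l.length ≤ fuel →
      PySem.Chars.splitOn.go ['\n'] fuel l cur acc = acc.reverse ++ pvPre' cur.reverse (pvSpl l) := by
  intro fuel
  induction fuel with
  | zero =>
    intro l cur acc hl
    have : l = [] := by cases l <;> simp_all
    subst this
    simp [PySem.Chars.splitOn.go, pvSpl, pvPre']
  | succ fuel ih =>
    intro l cur acc hl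
    cases l with
    | nil => simp [PySem.Chars.splitOn.go, pvSpl, pvPre']
    | cons c t =>
      rw [PySem.Chars.splitOn.go]
      by_cases hc : c = '\n'
      · subst hc
        rw [if_pos (by simp [List.isPrefixOf])]
        simp only [List.length_cons, List.drop_succ_cons, List.length_nil, List.drop_zero]
        rw [ih t [] _ (by simp at hl; omega)]
        rw [pvSpl, if_pos rfl]
        cases h : pvSpl t with
        | nil => exact absurd h (pvSpl_ne_nil t)
        | cons x xs => simp [pvPre']
      · rw [if_neg (by simp [List.isPrefixOf]; exact fun e => hc e.symm)]
        rw [ih t (c :: cur) acc (by simp at hl; omega)]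
        rw [pvSpl, if_neg hc]
        cases h : pvSpl t <;> simp [pvPre']

theorem splitOn_eq_pvSpl (l : List Char) : PySem.Chars.splitOn l ['\n'] = pvSpl l := by
  rw [PySem.Chars.splitOn, pvSpl_go (l.length + 1) l [] [] (by omega)]
  cases h : pvSpl l with
  | nil => exact absurd h (pvSpl_ne_nil l)
  | cons x xs => simp [pvPre']

theorem join_pvPre' (xs : List Char) (p : List (List Char)) (hp : p ≠ []) :
    PySem.Chars.join ['\n'] (pvPre' xs p) = xs ++ PySem.Chars.join ['\n'] p := by
  cases p with
  | nil => exact absurd rfl hp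
  | cons h t =>
    cases t with
    | nil => simp [pvPre', PySem.Chars.join_singleton]
    | cons y t2 =>
      rw [pvPre', PySem.Chars.join_cons_cons, PySem.Chars.join_cons_cons]
      simp

theorem join_pvSpl (l : List Char) : PySem.Chars.join ['\n'] (pvSpl l) = l := by
  induction l with
  | nil => simp [pvSpl, PySem.Chars.join_singleton]
  | cons c t ih =>
    rw [pvSpl]
    by_cases hc : c = '\n'
    · subst hc
      rw [if_pos rfl]
      cases h : pvSpl t with
      | nil => exact absurd h (pvSpl_ne_nil t)
      | cons x xs =>
        rw [PySem.Chars.join_cons_cons, ← h, ih]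
        simp
    · rw [if_neg hc, join_pvPre' _ _ (pvSpl_ne_nil t), ih]
      simp

theorem pvSpl_pieces_nl_free (l : List Char) : ∀ p ∈ pvSpl l, '\n' ∉ p := by
  induction l with
  | nil => simp [pvSpl]
  | cons c t ih =>
    rw [pvSpl]
    by_cases hc : c = '\n'
    · subst hc
      rw [if_pos rfl]
      intro p hp
      rcases List.mem_cons.mp hp with hp | hp
      · simp [hp]
      · exact ih p hp
    · rw [if_neg hc]
      cases h : pvSpl t with
      | nil => exact absurd h (pvSpl_ne_nil t)
      | cons x xs =>
        intro p hp
        rcases List.mem_cons.mp hp with hp | hp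
        · subst hp
          intro hmem
          rcases List.mem_cons.mp hmem with hm | hm
          · exact hc hm.symm
          · exact ih x (by rw [h]; exact List.mem_cons_self) hm
        · exact ih p (by rw [h]; exact List.mem_cons_of_mem _ hp)

theorem pvSpl_of_nl_free (x : List Char) (hx : '\n' ∉ x) : pvSpl x = [x] := by
  induction x with
  | nil => simp [pvSpl]
  | cons c t ih =>
    rw [pvSpl, if_neg (by intro e; exact hx (by simp [e]))]
    rw [ih (fun hm => hx (List.mem_cons_of_mem _ hm))]
    simp [pvPre']

theorem pvSpl_append_nl (a b : List Char) (ha : '\n' ∉ a) :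
    pvSpl (a ++ '\n' :: b) = a :: pvSpl b := by
  induction a with
  | nil => simp [pvSpl]
  | cons c a' ih =>
    rw [List.cons_append, pvSpl, if_neg (by intro e; exact ha (by simp [e]))]
    rw [ih (fun hm => ha (List.mem_cons_of_mem _ hm))]
    simp [pvPre']

theorem pvSpl_join (parts : List (List Char)) (h : ∀ p ∈ parts, '\n' ∉ p) (hne : parts ≠ []) :
    pvSpl (PySem.Chars.join ['\n'] parts) = parts := by
  induction parts with
  | nil => exact absurd rfl hne
  | cons x t ih =>
    cases t with
    | nil => rw [PySem.Chars.join_singleton]; exact pvSpl_of_nl_free x (h x (by simp))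
    | cons y t2 =>
      rw [PySem.Chars.join_cons_cons]
      have : x ++ ['\n'] ++ PySem.Chars.join ['\n'] (y :: t2)
           = x ++ '\n' :: PySem.Chars.join ['\n'] (y :: t2) := by simp
      rw [this, pvSpl_append_nl _ _ (h x (by simp))]
      rw [ih (fun p hp => h p (List.mem_cons_of_mem _ hp)) (by simp)]

theorem prefix_append_nl (old a b : List Char) (hnl : '\n' ∉ old) :
    old <+: (a ++ '\n' :: b) ↔ old <+: a := by
  constructor
  · intro hpre
    by_cases hle : old.length ≤ a.length
    · have := List.prefix_iff_eq_take.mp hpre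
      rw [List.take_append_of_le_length hle] at this
      rw [this]
      exact List.take_prefix _ _
    · exfalso
      apply hnl
      have hlen : a.length < old.length := by omega
      have hlen2 : old.length ≤ (a ++ '\n' :: b).length := hpre.length_le
      have : old[a.length]'hlen = (a ++ '\n' :: b)[a.length]'(by simp) :=
        hpre.getElem hlen
      have h2 : (a ++ '\n' :: b)[a.length]'(by simp) = '\n' := by
        simp
      rw [h2] at this
      rw [← this]
      exact List.getElem_mem hlen
  · intro hpre
    exact hpre.trans (List.prefix_append _ _)

theorem pvRep_append_nl (old new : List Char) (h : old ≠ []) (hnl : '\n' ∉ old) (a b : List Char) :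
    pvRep old new (a ++ '\n' :: b) = pvRep old new a ++ '\n' :: pvRep old new b := by
  have main : ∀ (n : Nat) (a : List Char), a.length ≤ n →
      pvRep old new (a ++ '\n' :: b) = pvRep old new a ++ '\n' :: pvRep old new b := by
    intro n
    induction n with
    | zero =>
      intro a ha
      have ha0 : a = [] := by cases a <;> simp_all
      subst ha0
      have hcond : ¬ (old.isPrefixOf ('\n' :: b) ∧ old ≠ []) := by
        rintro ⟨hp, -⟩
        have hpre := List.isPrefixOf_iff_prefix.mp hp
        cases old with
        | nil => exact h rfl
        | cons o os =>
          have ho : o = '\n' := (List.cons_prefix_cons.mp hpre).1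
          exact hnl (by simp [ho])
      show pvRep old new ([] ++ '\n' :: b) = pvRep old new [] ++ '\n' :: pvRep old new b
      rw [List.nil_append]
      conv_lhs => rw [pvRep]
      rw [if_neg hcond]
      simp [pvRep]
    | succ n ih =>
      intro a ha
      cases a with
      | nil => exact ih [] (by simp)
      | cons c a' =>
        rw [List.cons_append, pvRep]
        by_cases hp : old.isPrefixOf (c :: a' ++ '\n' :: b)
        · have hpre : old <+: (c :: a') := by
            have := List.isPrefixOf_iff_prefix.mp hp
            exact (prefix_append_nl old (c :: a') b hnl).mp (by simpa using this)
          have hp2 : old.isPrefixOf (c :: a') := List.isPrefixOf_iff_prefix.mpr hpre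
          rw [if_pos ⟨hp, h⟩]
          have hlen : old.length ≤ a'.length + 1 := by simpa using hpre.length_le
          have hpos : 1 ≤ old.length := by
            cases old with | nil => exact absurd rfl h | cons _ _ => simp
          have hdrop : (a' ++ '\n' :: b).drop (old.length - 1)
              = a'.drop (old.length - 1) ++ '\n' :: b := by
            rw [List.drop_append_of_le_length (by omega)]
          rw [hdrop, ih _ (by simp at ha ⊢; omega)]
          conv_rhs => rw [pvRep, if_pos ⟨hp2, h⟩]
          simp
        · rw [if_neg (by tauto)]
          have hp2 : ¬ old.isPrefixOf (c :: a') := by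
            intro hc
            exact hp (List.isPrefixOf_iff_prefix.mpr
              ((List.isPrefixOf_iff_prefix.mp hc).trans (by simp)))
          rw [ih a' (by simp at ha; omega)]
          conv_rhs => rw [pvRep, if_neg (by tauto)]
          simp
  exact main a.length a le_rfl

theorem pvRep_join (old new : List Char) (h : old ≠ []) (hnl : '\n' ∉ old)
    (parts : List (List Char)) :
    pvRep old new (PySem.Chars.join ['\n'] parts) = PySem.Chars.join ['\n'] (parts.map (pvRep old new)) := by
  induction parts with
  | nil => simp [PySem.Chars.join_nil, pvRep]
  | cons x t ih =>
    cases t with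
    | nil => simp [PySem.Chars.join_singleton]
    | cons y t2 =>
      rw [PySem.Chars.join_cons_cons, List.map_cons, List.map_cons, PySem.Chars.join_cons_cons]
      have e : x ++ ['\n'] ++ PySem.Chars.join ['\n'] (y :: t2)
          = x ++ '\n' :: PySem.Chars.join ['\n'] (y :: t2) := by simp
      rw [e, pvRep_append_nl old new h hnl, ih]
      simp

theorem pvRep_nl_free (old new : List Char) (hnew : '\n' ∉ new) :
    ∀ l, '\n' ∉ l → '\n' ∉ pvRep old new l := by
  have main : ∀ (n : Nat) (l : List Char), l.length ≤ n → '\n' ∉ l → '\n' ∉ pvRep old new l := by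
    intro n
    induction n with
    | zero =>
      intro l hl hfree
      have : l = [] := by cases l <;> simp_all
      subst this
      simp [pvRep]
    | succ n ih =>
      intro l hl hfree
      cases l with
      | nil => simp [pvRep]
      | cons c t =>
        rw [pvRep]
        split
        · intro hmem
          rcases List.mem_append.mp hmem with hm | hm
          · exact hnew hm
          · exact ih _ (by simp at hl ⊢; omega)
              (fun hx => hfree (List.mem_cons_of_mem _ (List.mem_of_mem_drop hx))) hm
        · intro hmem
          rcases List.mem_cons.mp hmem with hm | hm
          · exact hfree (List.mem_cons.mpr (Or.inl hm))
          · exact ih t (by simp at hl; omega) (fun hx => hfree (List.mem_cons_of_mem _ hx)) hm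
  exact fun l => main l.length l le_rfl

-- ---- scanner fusion: pvScan (ps ++ [q]) = pvRep q ∘ pvScan ps  under non-interference ----

-- Bool-valued "one is a prefix of the other" (the way two pattern occurrences can interfere)
def pvCompat (a b : List Char) : Bool := a.isPrefixOf b || b.isPrefixOf a

theorem pvCompat_false {a b : List Char} (h : pvCompat a b = false) :
    ¬ a <+: b ∧ ¬ b <+: a := by
  simp only [pvCompat, Bool.or_eq_false_iff] at h
  simpa [← List.isPrefixOf_iff_prefix] using h

theorem pv_prefix_or {a u r : List Char} (h : a <+: u ++ r) : a <+: u ∨ u <+: a :=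
  List.prefix_or_prefix_of_prefix h (List.prefix_append u r)

-- pvRep walks through a block in which the pattern cannot start
theorem pvRep_append_clean (q1 q2 : List Char) (d X : List Char)
    (hd : ∀ i < d.length, pvCompat q1 (d.drop i) = false) :
    pvRep q1 q2 (d ++ X) = d ++ pvRep q1 q2 X := by
  induction d with
  | nil => simp
  | cons b d' ih =>
    rw [List.cons_append, pvRep]
    have hnp : ¬ (q1.isPrefixOf (b :: (d' ++ X)) ∧ q1 ≠ []) := by
      rintro ⟨hp, -⟩
      have h0 := pvCompat_false (hd 0 (by simp))
      rcases pv_prefix_or (show q1 <+: (b :: d') ++ X by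
        simpa using List.isPrefixOf_iff_prefix.mp hp) with h | h
      · exact h0.1 (by simpa using h)
      · exact h0.2 (by simpa using h)
    rw [if_neg hnp, ih (fun i hi => by
      have := hd (i + 1) (by simp; omega)
      simpa using this)]
    simp

-- pvRep fires on a leading occurrence of its pattern
theorem pvRep_fire (q1 q2 X : List Char) (hq : q1 ≠ []) :
    pvRep q1 q2 (q1 ++ X) = q2 ++ pvRep q1 q2 X := by
  cases q1 with
  | nil => exact absurd rfl hq
  | cons o os =>
    rw [List.cons_append, pvRep, if_pos ⟨List.isPrefixOf_iff_prefix.mpr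
      (by exact (List.prefix_append _ _)), hq⟩]
    simp

-- a block in which no pattern of ps matches is copied verbatim by pvScan
theorem pvScan_block (ps : List (List Char × List Char)) (q1 : List Char) :
    ∀ l, q1 <+: l → (∀ j < q1.length, pvFind ps (l.drop j) = none) →
      pvScan ps l = q1 ++ pvScan ps (l.drop q1.length) := by
  induction q1 with
  | nil => intro l _ _; simp
  | cons c v ih =>
    intro l hpre hnp
    obtain ⟨r, rfl⟩ := hpre
    rw [show (c :: v) ++ r = c :: (v ++ r) by simp]
    rw [pvScan]
    have h0 := hnp 0 (by simp)
    simp only [List.drop_zero] at h0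
    rw [show ((c :: v) ++ r : List Char) = c :: (v ++ r) by simp] at h0
    rw [h0]
    rw [ih (v ++ r) (List.prefix_append v r) (fun j hj => by
      have := hnp (j + 1) (by simp; omega)
      simpa using this)]
    simp

-- whether a "clean" word is a prefix is unchanged by scanning
theorem pvScan_prefix_iff (ps : List (List Char × List Char)) :
    ∀ (t v : List Char),
      (∀ j < v.length, ∀ p ∈ ps, pvCompat (v.drop j) p.1 = false) →
      (∀ j < v.length, ∀ p ∈ ps, pvCompat (v.drop j) p.2 = false) →
      (v <+: pvScan ps t ↔ v <+: t) := by
  intro t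
  induction t with
  | nil => intro v _ _; simp [pvScan]
  | cons c t' ih =>
    intro v hv1 hv2
    cases v with
    | nil => simp
    | cons a v' =>
      rw [pvScan]
      cases hf : pvFind ps (c :: t') with
      | some p =>
        have hmem : p ∈ ps := List.mem_of_find?_eq_some hf
        have hpred := List.find?_some hf
        simp only [Bool.and_eq_true, List.isPrefixOf_iff_prefix] at hpred
        constructor
        · intro h
          exfalso
          have h0 := pvCompat_false (hv2 0 (by simp) p hmem)
          rcases pv_prefix_or h with hh | hh
          · exact h0.1 (by simpa using hh)
          · exact h0.2 (by simpa using hh)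
        · intro h
          exfalso
          have h0 := pvCompat_false (hv1 0 (by simp) p hmem)
          rcases List.prefix_or_prefix_of_prefix h hpred.1 with hh | hh
          · exact h0.1 (by simpa using hh)
          · exact h0.2 (by simpa using hh)
      | none =>
        rw [List.cons_prefix_cons, List.cons_prefix_cons]
        exact and_congr_right fun _ => ih v'
          (fun j hj p hp => by have := hv1 (j + 1) (by simp; omega) p hp; simpa using this)
          (fun j hj p hp => by have := hv2 (j + 1) (by simp; omega) p hp; simpa using this)

-- the fusion theorem: appending a lowest-priority pattern to the scanner equals running
-- the scanner and then one pvRep pass, provided the patterns cannot interfere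
theorem pvFuse (ps : List (List Char × List Char)) (q : List Char × List Char)
    (hq : q.1 ≠ [])
    (hC2 : ∀ p ∈ ps, ∀ j < q.1.length, 0 < j → pvCompat (q.1.drop j) p.1 = false)
    (hC3 : ∀ p ∈ ps, ∀ j < q.1.length, 0 < j → pvCompat (q.1.drop j) p.2 = false)
    (hC1 : ∀ p ∈ ps, ∀ i < p.2.length, pvCompat q.1 (p.2.drop i) = false) :
    ∀ l, pvScan (ps ++ [q]) l = pvRep q.1 q.2 (pvScan ps l) := by
  have main : ∀ (n : Nat) (l : List Char), l.length ≤ n →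
      pvScan (ps ++ [q]) l = pvRep q.1 q.2 (pvScan ps l) := by
    intro n
    induction n with
    | zero =>
      intro l hl
      have : l = [] := by cases l <;> simp_all
      subst this
      simp [pvScan, pvRep]
    | succ n ih =>
      intro l hl
      cases l with
      | nil => simp [pvScan, pvRep]
      | cons c t =>
        have hsplit : pvFind (ps ++ [q]) (c :: t)
            = (pvFind ps (c :: t)).or (pvFind [q] (c :: t)) := by
          simp [pvFind, List.find?_append]
        cases hf : pvFind ps (c :: t) with
        | some p =>
          have hmem : p ∈ ps := List.mem_of_find?_eq_some hf
          have hL : pvScan (ps ++ [q]) (c :: t)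
              = p.2 ++ pvScan (ps ++ [q]) (t.drop (p.1.length - 1)) := by
            rw [pvScan, hsplit, hf]; rfl
          have hR : pvScan ps (c :: t) = p.2 ++ pvScan ps (t.drop (p.1.length - 1)) := by
            rw [pvScan, hf]
          rw [hL, hR, ih _ (by simp at hl ⊢; omega)]
          rw [pvRep_append_clean q.1 q.2 p.2 _ (fun i hi => hC1 p hmem i hi)]
        | none =>
          by_cases hqm : q.1 <+: (c :: t)
          · have hfq : pvFind [q] (c :: t) = some q := by
              simp [pvFind, List.isPrefixOf_iff_prefix, hqm, hq]
            have hL : pvScan (ps ++ [q]) (c :: t)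
                = q.2 ++ pvScan (ps ++ [q]) (t.drop (q.1.length - 1)) := by
              rw [pvScan, hsplit, hf, hfq]; rfl
            obtain ⟨o, os, ho⟩ : ∃ o os, q.1 = o :: os := by
              cases hx : q.1 with
              | nil => exact absurd hx hq
              | cons o os => exact ⟨o, os, rfl⟩
            obtain ⟨r, hr⟩ := hqm
            have hblock : pvScan ps (c :: t) = q.1 ++ pvScan ps ((c :: t).drop q.1.length) := by
              apply pvScan_block ps q.1 (c :: t) ⟨r, hr⟩
              intro j hj
              rcases Nat.eq_zero_or_pos j with rfl | hjpos
              · simpa using hf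
              · rw [← hr, List.drop_append_of_le_length (by omega)]
                rw [pvFind, List.find?_eq_none]
                intro p hp hpred
                simp only [Bool.and_eq_true, List.isPrefixOf_iff_prefix] at hpred
                have hcf := pvCompat_false (hC2 p hp j hj hjpos)
                rcases pv_prefix_or hpred.1 with hh | hh
                · exact hcf.2 hh
                · exact hcf.1 hh
            have hdropeq : (c :: t).drop q.1.length = t.drop (q.1.length - 1) := by
              rw [ho]; simp
            rw [hL, hblock, pvRep_fire q.1 q.2 _ hq, hdropeq,
              ih _ (by simp [List.length_drop] at hl ⊢; omega)]
          · have hfq : pvFind [q] (c :: t) = none := by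
              simp [pvFind, List.isPrefixOf_iff_prefix, hqm]
            have hL : pvScan (ps ++ [q]) (c :: t) = c :: pvScan (ps ++ [q]) t := by
              rw [pvScan, hsplit, hf, hfq]; rfl
            have hR : pvScan ps (c :: t) = c :: pvScan ps t := by
              rw [pvScan, hf]
            rw [hL, hR, pvRep]
            rw [if_neg (by
              rintro ⟨hp', -⟩
              have hp'' := List.isPrefixOf_iff_prefix.mp hp'
              obtain ⟨a, v, hx⟩ : ∃ a v, q.1 = a :: v := by
                cases hy : q.1 with
                | nil => exact absurd hy hq
                | cons a v => exact ⟨a, v, rfl⟩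
              rw [hx, List.cons_prefix_cons] at hp''
              have hv1 : ∀ j < v.length, ∀ p ∈ ps, pvCompat (v.drop j) p.1 = false := by
                intro j hj p hp
                have := hC2 p hp (j + 1) (by rw [hx]; simp; omega) (by omega)
                simpa [hx] using this
              have hv2 : ∀ j < v.length, ∀ p ∈ ps, pvCompat (v.drop j) p.2 = false := by
                intro j hj p hp
                have := hC3 p hp (j + 1) (by rw [hx]; simp; omega) (by omega)
                simpa [hx] using this
              have hvt : v <+: t := (pvScan_prefix_iff ps t v hv1 hv2).mp hp''.2
              exact hqm (by rw [hx, hp''.1]; exact List.cons_prefix_cons.mpr ⟨rfl, hvt⟩))]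
            rw [ih t (by simp at hl; omega)]
  exact fun l => main l.length l le_rfl

-- a one-pattern scan is exactly pvRep
theorem pvScan_single (q1 q2 : List Char) (hq : q1 ≠ []) :
    ∀ l, pvScan [(q1, q2)] l = pvRep q1 q2 l := by
  have main : ∀ (n : Nat) (l : List Char), l.length ≤ n →
      pvScan [(q1, q2)] l = pvRep q1 q2 l := by
    intro n
    induction n with
    | zero =>
      intro l hl
      have : l = [] := by cases l <;> simp_all
      subst this
      simp [pvScan, pvRep]
    | succ n ih =>
      intro l hl
      cases l with
      | nil => simp [pvScan, pvRep]
      | cons c t =>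
        by_cases hp : q1.isPrefixOf (c :: t)
        · have hfq : pvFind [(q1, q2)] (c :: t) = some (q1, q2) := by
            simp [pvFind, hp, hq]
          have hL : pvScan [(q1, q2)] (c :: t)
              = q2 ++ pvScan [(q1, q2)] (t.drop (q1.length - 1)) := by
            rw [pvScan, hfq]
          rw [hL, pvRep, if_pos ⟨hp, hq⟩, ih _ (by simp [List.length_drop] at hl ⊢; omega)]
        · have hfq : pvFind [(q1, q2)] (c :: t) = none := by
            simp [pvFind, hp]
          have hL : pvScan [(q1, q2)] (c :: t) = c :: pvScan [(q1, q2)] t := by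
            rw [pvScan, hfq]
          rw [hL, pvRep, if_neg (by tauto), ih t (by simp at hl; omega)]
  exact fun l => main l.length l le_rfl

-- B's header scan = A's three sequential header replaces
theorem scan_head (l : List Char) :
    pvScan pvHEAD l
      = pvRep "# ".toList "h1. ".toList (pvRep "## ".toList "h2. ".toList
          (pvRep "### ".toList "h3. ".toList l)) := by
  have e1 := pvScan_single "### ".toList "h3. ".toList (by decide)
  have e2 := pvFuse [("### ".toList, "h3. ".toList)] ("## ".toList, "h2. ".toList)
    (by decide) (by decide) (by decide) (by decide)
  have e3 := pvFuse [("### ".toList, "h3. ".toList), ("## ".toList, "h2. ".toList)]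
    ("# ".toList, "h1. ".toList) (by decide) (by decide) (by decide) (by decide)
  have h2 : pvHEAD = [("### ".toList, "h3. ".toList), ("## ".toList, "h2. ".toList)]
      ++ [("# ".toList, "h1. ".toList)] := by rfl
  have h1 : [("### ".toList, "h3. ".toList), ("## ".toList, "h2. ".toList)]
      = [("### ".toList, "h3. ".toList)] ++ [("## ".toList, "h2. ".toList)] := by rfl
  rw [h2, e3, h1, e2, e1]

-- B's tail scan = A's five sequential tail replaces
theorem scan_tail (l : List Char) :
    pvScan pvTAIL l
      = pvRep "__".toList "_".toList (pvRep "**".toList "*".toList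
          (pvRep "```".toList "{code}".toList (pvRep "- [x]".toList "(/) ".toList
            (pvRep "- [ ]".toList "(x)".toList l)))) := by
  have e1 := pvScan_single "- [ ]".toList "(x)".toList (by decide)
  have e2 := pvFuse [("- [ ]".toList, "(x)".toList)] ("- [x]".toList, "(/) ".toList)
    (by decide) (by decide) (by decide) (by decide)
  have e3 := pvFuse [("- [ ]".toList, "(x)".toList), ("- [x]".toList, "(/) ".toList)]
    ("```".toList, "{code}".toList) (by decide) (by decide) (by decide) (by decide)
  have e4 := pvFuse [("- [ ]".toList, "(x)".toList), ("- [x]".toList, "(/) ".toList),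
      ("```".toList, "{code}".toList)] ("**".toList, "*".toList)
    (by decide) (by decide) (by decide) (by decide)
  have e5 := pvFuse [("- [ ]".toList, "(x)".toList), ("- [x]".toList, "(/) ".toList),
      ("```".toList, "{code}".toList), ("**".toList, "*".toList)] ("__".toList, "_".toList)
    (by decide) (by decide) (by decide) (by decide)
  have h5 : pvTAIL = [("- [ ]".toList, "(x)".toList), ("- [x]".toList, "(/) ".toList),
      ("```".toList, "{code}".toList), ("**".toList, "*".toList)]
      ++ [("__".toList, "_".toList)] := by rfl
  have h4 : [("- [ ]".toList, "(x)".toList), ("- [x]".toList, "(/) ".toList),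
      ("```".toList, "{code}".toList), ("**".toList, "*".toList)]
      = [("- [ ]".toList, "(x)".toList), ("- [x]".toList, "(/) ".toList),
      ("```".toList, "{code}".toList)] ++ [("**".toList, "*".toList)] := by rfl
  have h3 : [("- [ ]".toList, "(x)".toList), ("- [x]".toList, "(/) ".toList),
      ("```".toList, "{code}".toList)]
      = [("- [ ]".toList, "(x)".toList), ("- [x]".toList, "(/) ".toList)]
      ++ [("```".toList, "{code}".toList)] := by rfl
  have h2 : [("- [ ]".toList, "(x)".toList), ("- [x]".toList, "(/) ".toList)]
      = [("- [ ]".toList, "(x)".toList)] ++ [("- [x]".toList, "(/) ".toList)] := by rfl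
  rw [h5, e5, h4, e4, h3, e3, h2, e2, e1]

-- B's per-line conversion = A's per-line replace pipeline
theorem line_eq (l : List Char) :
    (pvBLine l) = pvRep "__".toList "_".toList (pvRep "**".toList "*".toList
      (pvRep "```".toList "{code}".toList (pvRep "- [x]".toList "(/) ".toList
        (pvRep "- [ ]".toList "(x)".toList (pvALine
          (pvRep "# ".toList "h1. ".toList (pvRep "## ".toList "h2. ".toList
            (pvRep "### ".toList "h3. ".toList l)))))))) := by
  simp only [pvBLine, pvALine, scan_head, scan_tail]
  cases hb1 : PySem.Chars.startswith (PySem.Chars.strip (pvRep "# ".toList "h1. ".toList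
      (pvRep "## ".toList "h2. ".toList (pvRep "### ".toList "h3. ".toList l)))) "- ".toList <;>
  cases hb2 : PySem.Chars.startswith (PySem.Chars.strip (pvRep "# ".toList "h1. ".toList
      (pvRep "## ".toList "h2. ".toList (pvRep "### ".toList "h3. ".toList l)))) "* ".toList <;>
  simp

theorem chars_eq (cs : List Char) :
    pvAChars cs = PySem.Chars.join ['\n'] ((PySem.Chars.splitOn cs ['\n']).map pvBLine) := by
  have r1 : ∀ x, PySem.Chars.replace x "### ".toList "h3. ".toList = pvRep "### ".toList "h3. ".toList x := fun x => replace_eq_pvRep x _ _ (by decide)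
  have r2 : ∀ x, PySem.Chars.replace x "## ".toList "h2. ".toList = pvRep "## ".toList "h2. ".toList x := fun x => replace_eq_pvRep x _ _ (by decide)
  have r3 : ∀ x, PySem.Chars.replace x "# ".toList "h1. ".toList = pvRep "# ".toList "h1. ".toList x := fun x => replace_eq_pvRep x _ _ (by decide)
  have r4 : ∀ x, PySem.Chars.replace x "- [ ]".toList "(x)".toList = pvRep "- [ ]".toList "(x)".toList x := fun x => replace_eq_pvRep x _ _ (by decide)
  have r5 : ∀ x, PySem.Chars.replace x "- [x]".toList "(/) ".toList = pvRep "- [x]".toList "(/) ".toList x := fun x => replace_eq_pvRep x _ _ (by decide)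
  have r6 : ∀ x, PySem.Chars.replace x "```".toList "{code}".toList = pvRep "```".toList "{code}".toList x := fun x => replace_eq_pvRep x _ _ (by decide)
  have r7 : ∀ x, PySem.Chars.replace x "**".toList "*".toList = pvRep "**".toList "*".toList x := fun x => replace_eq_pvRep x _ _ (by decide)
  have r8 : ∀ x, PySem.Chars.replace x "__".toList "_".toList = pvRep "__".toList "_".toList x := fun x => replace_eq_pvRep x _ _ (by decide)
  rw [splitOn_eq_pvSpl]
  unfold pvAChars
  simp only [r1, r2, r3, r4, r5, r6, r7, r8]
  rw [PySem.List.foldl_append_singleton_eq_map, List.nil_append]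
  -- header replaces distribute over the lines of cs
  conv_lhs => rw [show cs = PySem.Chars.join ['\n'] (pvSpl cs) from (join_pvSpl cs).symm]
  rw [pvRep_join _ _ (by decide) (by decide), pvRep_join _ _ (by decide) (by decide),
      pvRep_join _ _ (by decide) (by decide), pvRep_join _ _ (by decide) (by decide),
      pvRep_join _ _ (by decide) (by decide), pvRep_join _ _ (by decide) (by decide),
      pvRep_join _ _ (by decide) (by decide), pvRep_join _ _ (by decide) (by decide)]
  rw [splitOn_eq_pvSpl]
  rw [pvSpl_join _ (by
        intro p hp
        simp only [List.map_map, List.mem_map] at hp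
        rcases hp with ⟨q, hq, rfl⟩
        exact pvRep_nl_free _ _ (by decide) _ (pvRep_nl_free _ _ (by decide) _
          (pvRep_nl_free _ _ (by decide) _ (pvSpl_pieces_nl_free cs q hq))))
      (by simp [pvSpl_ne_nil])]
  simp only [List.map_map]
  exact congrArg _ (List.map_congr_left (fun x _ => (line_eq x).symm))

-- ===== VERDICT (by name: the statement is the Claim_ definition above) =====
theorem convert_md_to_jira_spec : Claim_equal_convert_md_to_jira := by
  intro md_text _
  unfold Spec_convert_md_to_jira convert_md_to_jira convert_md_to_jira_alt
  match md_text with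
  | none => rfl
  | some s =>
    by_cases hs : s.toList = []
    · simp [hs]
    · show (if s.toList = [] then "" else String.ofList (pvAChars s.toList)) = _
      rw [if_neg hs]
      show _ = (if s.toList = [] then "" else _)
      rw [if_neg hs, PySem.List.foldl_append_singleton_eq_map, List.nil_append, chars_eq]
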